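-- pv_equiv track=rewrite | github.com/parableoflife/ResearchNGCCheck | research_NRGC_3.0.py | mmfinder
-- ===== SOURCE A (Python) =====
-- def mmfinder(text):
--     lastword=""
--     newword=""
--     for i in text:
--         if i ==" " or i=="." or i=="-":
--             if newword == "millimeters" or newword=="mm":
--                 return lastword
--             else:
--                 lastword=newword
--                 newword=""
--         else:
--             newword+=i
--     return "NONE"
-- ===== SOURCE B (Python) =====
-- def mmfinder(text):
--     tokens = text.replace(".", " ").replace("-", " ").split(" ")
--     prev = ""
--     for tok in tokens[:-1]:
--         if tok == "mm" or tok == "millimeters":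
--             return prev
--         prev = tok
--     return "NONE"
-- ===== Notes on version B (the rewrite author's own statement) =====
-- stated objective: simpler
-- what changed: Replaces A's char-by-char loop with two accumulator strings by an idiomatic replace/split that prebuilds the token list once and then scans tokens[:-1] word-by-word, returning the previous token on a match.
import Mathlib
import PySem

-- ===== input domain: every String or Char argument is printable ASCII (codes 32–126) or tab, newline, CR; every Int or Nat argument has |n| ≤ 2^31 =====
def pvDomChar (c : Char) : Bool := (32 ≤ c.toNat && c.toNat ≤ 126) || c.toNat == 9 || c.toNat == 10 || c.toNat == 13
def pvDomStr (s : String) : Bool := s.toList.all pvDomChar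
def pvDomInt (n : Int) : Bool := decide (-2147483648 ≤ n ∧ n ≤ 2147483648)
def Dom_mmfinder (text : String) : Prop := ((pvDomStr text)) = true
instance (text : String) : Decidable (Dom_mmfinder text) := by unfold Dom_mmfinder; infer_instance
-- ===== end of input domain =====

-- B replaces A's char-by-char accumulator loop with an idiomatic replace/split token list
-- scanned word-by-word (objective: simpler; same O(n) cost).

-- ===== PORT A =====
-- literal transliteration of A's char loop: state (lastword, newword), early return at a delimiter
def mmA : List Char → List Char → List Char → String
  | [], _, _ => "NONE"
  | c :: rest, lastword, newword =>
    if c = ' ' ∨ c = '.' ∨ c = '-' then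
      if newword = "millimeters".toList ∨ newword = "mm".toList then String.ofList lastword
      else mmA rest newword []
    else mmA rest lastword (newword ++ [c])

def mmfinder (text : String) : String := mmA text.toList [] []

-- ===== PORT B =====
-- literal transliteration of B's token scan over tokens[:-1]
def mmBgo : List (List Char) → List Char → String
  | [], _ => "NONE"
  | t :: ts, prev =>
    if t = "mm".toList ∨ t = "millimeters".toList then String.ofList prev else mmBgo ts t

def mmfinder_alt (text : String) : String :=
  let tokens := PySem.Chars.splitOn
    (PySem.Str.replace (PySem.Str.replace text "." " ") "-" " ").toList [' ']
  mmBgo (PySem.List.slice tokens none (some (-1))) []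

-- ===== PRECONDITION & SPEC =====
def Spec_mmfinder (text : String) (out : String) : Prop := out = mmfinder_alt text
instance (text : String) (out : String) : Decidable (Spec_mmfinder text out) := by unfold Spec_mmfinder; infer_instance

-- ===== CLAIM (what is proved, stated in full; the proofs are below) =====
def Claim_equal_mmfinder : Prop := ∀ (text : String), Dom_mmfinder text → Spec_mmfinder text (mmfinder text)

-- ===== LEMMAS AND PROOFS =====

-- spec-level splitter on the three delimiters
def splitD : List Char → List (List Char)
  | [] => [[]]
  | c :: cs =>
    if c = ' ' ∨ c = '.' ∨ c = '-' then [] :: splitD cs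
    else (splitD cs).modifyHead (c :: ·)

lemma splitD_ne_nil (cs : List Char) : splitD cs ≠ [] := by
  cases cs with
  | nil => simp [splitD]
  | cons c cs =>
    simp only [splitD]
    split <;> simp [List.modifyHead_eq_nil_iff, splitD_ne_nil cs]

-- the single-character substitution performed by the two replaces
def subst (c : Char) : Char := if c = '.' ∨ c = '-' then ' ' else c

lemma replace_single (d e : Char) :
    ∀ (fuel : Nat) (l acc : List Char), l.length ≤ fuel →
      PySem.Chars.replace.go [d] [e] fuel l acc =
        acc.reverse ++ l.map (fun c => if c = d then e else c) := by
  intro fuel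
  induction fuel with
  | zero =>
    intro l acc h
    have : l = [] := by cases l <;> simp_all
    subst this; simp [PySem.Chars.replace.go]
  | succ n ih =>
    intro l acc h
    cases l with
    | nil => simp [PySem.Chars.replace.go]
    | cons c t =>
      simp only [PySem.Chars.replace.go]
      by_cases hc : c = d
      · subst hc
        rw [if_pos (by simp [List.isPrefixOf])]
        simp only [List.length_cons, List.length_nil, Nat.zero_add, List.drop_succ_cons,
          List.drop_zero]
        rw [ih t _ (by simp at h; omega)]
        simp
      · rw [if_neg (by simp [List.isPrefixOf]; exact fun h => hc h.symm)]
        rw [ih t _ (by simp at h; omega)]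
        simp [hc]

lemma chars_replace_single (d e : Char) (l : List Char) :
    PySem.Chars.replace l [d] [e] = l.map (fun c => if c = d then e else c) := by
  simp [PySem.Chars.replace, replace_single d e l.length l [] le_rfl]

-- the spec-level space-only splitter
def splitSp : List Char → List (List Char)
  | [] => [[]]
  | c :: cs =>
    if c = ' ' then [] :: splitSp cs
    else (splitSp cs).modifyHead (c :: ·)

lemma splitOn_go_spec :
    ∀ (fuel : Nat) (l cur : List Char) (accs : List (List Char)), l.length ≤ fuel →
      PySem.Chars.splitOn.go [' '] fuel l cur accs =
        accs.reverse ++ (splitSp l).modifyHead (cur.reverse ++ ·) := by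
  intro fuel
  induction fuel with
  | zero =>
    intro l cur accs h
    have : l = [] := by cases l <;> simp_all
    subst this
    simp [PySem.Chars.splitOn.go, splitSp]
  | succ n ih =>
    intro l cur accs h
    cases l with
    | nil => simp [PySem.Chars.splitOn.go, splitSp]
    | cons c t =>
      simp only [PySem.Chars.splitOn.go]
      by_cases hc : c = ' '
      · subst hc
        rw [if_pos (by simp [List.isPrefixOf])]
        simp only [List.length_cons, List.length_nil, Nat.zero_add, List.drop_succ_cons,
          List.drop_zero]
        rw [ih t [] _ (by simp at h; omega)]
        simp only [splitSp, List.reverse_cons, List.reverse_nil, List.nil_append,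
          List.append_assoc, List.cons_append]
        cases splitSp t <;> simp
      · rw [if_neg (by simp [List.isPrefixOf]; exact fun h => hc h.symm)]
        rw [ih t (c :: cur) accs (by simp at h; omega)]
        rw [splitSp, if_neg hc, List.modifyHead_modifyHead]
        congr 2
        funext x
        simp

-- splitting the substituted list on ' ' is splitting the original on the three delimiters
lemma splitSp_map_subst (cs : List Char) : splitSp (cs.map subst) = splitD cs := by
  induction cs with
  | nil => rfl
  | cons c cs ih =>
    by_cases h : c = ' ' ∨ c = '.' ∨ c = '-'
    · have hs : subst c = ' ' := by
        rcases h with h | h | h <;> simp [subst, h]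
      simp [splitSp, splitD, hs, h, ih]
    · have h1 : ¬ c = ' ' := fun hh => h (Or.inl hh)
      have h2 : ¬ (c = '.' ∨ c = '-') := fun hh => h (Or.inr hh)
      have hs : subst c = c := if_neg h2
      simp [splitSp, splitD, hs, h1, h2, ih]

-- A's loop equals B's token scan, for any loop state
lemma mmA_eq_go (cs : List Char) :
    ∀ lastword newword,
      mmA cs lastword newword =
        mmBgo (((splitD cs).modifyHead (newword ++ ·)).dropLast) lastword := by
  induction cs with
  | nil => intro l n; simp [mmA, splitD, mmBgo]
  | cons c cs ih =>
    intro l n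
    by_cases h : c = ' ' ∨ c = '.' ∨ c = '-'
    · simp only [mmA, if_pos h, splitD]
      obtain ⟨x, xs, hx⟩ : ∃ x xs, splitD cs = x :: xs :=
        List.exists_cons_of_ne_nil (splitD_ne_nil cs)
      rw [hx]
      simp only [List.modifyHead_cons, List.append_nil]
      rw [show (n :: x :: xs).dropLast = n :: (x :: xs).dropLast from rfl]
      by_cases hm : n = "millimeters".toList ∨ n = "mm".toList
      · rw [if_pos hm]
        simp only [mmBgo]
        rw [if_pos (by tauto)]
      · rw [if_neg hm]
        simp only [mmBgo]
        rw [if_neg (by tauto)]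
        rw [ih, hx]
        simp
    · simp only [mmA, if_neg h, splitD, ih]
      have hfun : ((fun x => n ++ x) ∘ fun x => c :: x) = fun x => n ++ [c] ++ x := by
        funext x; simp
      rw [List.modifyHead_modifyHead, hfun]

-- ===== VERDICT (by name: the statement is the Claim_ definition above) =====
theorem mmfinder_spec : Claim_equal_mmfinder := by
  intro text _
  have hrepl :
      (PySem.Str.replace (PySem.Str.replace text "." " ") "-" " ").toList
        = text.toList.map subst := by
    simp only [PySem.Str.toList_replace]
    rw [show (".".toList) = ['.'] from rfl, show ("-".toList) = ['-'] from rfl,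
       show (" ".toList) = [' '] from rfl]
    rw [chars_replace_single, chars_replace_single, List.map_map]
    congr 1
    funext c
    by_cases h1 : c = '.' <;> by_cases h2 : c = '-' <;> simp [subst, h1, h2, Function.comp]
  have hsplit : PySem.Chars.splitOn (text.toList.map subst) [' '] = splitD text.toList := by
    rw [PySem.Chars.splitOn]
    rw [splitOn_go_spec _ _ [] [] (by omega)]
    simp only [List.reverse_nil, List.nil_append, splitSp_map_subst]
    cases splitD text.toList <;> simp
  have hid : List.modifyHead (fun x => [] ++ x) (splitD text.toList) = splitD text.toList := by
    cases splitD text.toList <;> simp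
  show mmfinder text = mmfinder_alt text
  unfold mmfinder mmfinder_alt
  rw [mmA_eq_go, hrepl, hsplit, hid]
  simp only [PySem.List.slice_to_neg_one]
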